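-- pv_equiv track=rewrite | github.com/kokko-ng/dsa-exercises | dsa_helpers/comparators.py | frequency_sort_compare
-- ===== SOURCE A (Python) =====
-- from typing import Any
--
-- def frequency_sort_compare(result: Any, expected_input: str) -> bool:
--     """Compare frequency-sorted strings.
--
--     Validates that result is correctly sorted by character frequency (descending).
--     Characters with same frequency can be in any order among themselves.
--     """
--     if not isinstance(result, str):
--         return False
--     if len(result) != len(expected_input):
--         return False
--     if sorted(result) != sorted(expected_input):
--         return False
--
--     # Build frequency map from result
--     from collections import Counter
--
--     input_freq = Counter(expected_input)
--
--     # Track frequencies as we traverse result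
--     prev_freq = float("inf")
--     i = 0
--     while i < len(result):
--         char = result[i]
--         freq = input_freq[char]
--         # Count consecutive occurrences of this char
--         count = 0
--         while i < len(result) and result[i] == char:
--             count += 1
--             i += 1
--         # All occurrences must be together
--         if count != freq:
--             return False
--         # Frequency must be <= previous (descending order)
--         if freq > prev_freq:
--             return False
--         prev_freq = freq
--     return True
-- ===== SOURCE B (Python) =====
-- from collections import Counter
--
--
-- def frequency_sort_compare(result, expected_input):
--     """Single forward zip-pass with a set of 'closed' characters.
--
--     A string is a valid frequency sort iff it is a permutation of the input,
--     no character's occurrences are split across two runs (re-entering a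
--     character whose run already ended), and at each run boundary the entered
--     character's total count does not exceed the left character's.
--     """
--     if not isinstance(result, str):
--         return False
--     cnt = Counter(result)
--     if cnt != Counter(expected_input):
--         return False
--     closed = set()
--     for a, b in zip(result, result[1:]):
--         if a != b:
--             if b in closed or cnt[a] < cnt[b]:
--                 return False
--             closed.add(a)
--     return True
-- ===== Notes on version B (the rewrite author's own statement) =====
-- stated objective: alternative
-- what changed: Replaces A's run-measuring while loop (count each run, compare to the Counter, track prev_freq) by a permutation test (Counter equality instead of len+sorted comparison) followed by one zip pass over adjacent character pairs that keeps a set of 'closed' characters: re-entering a closed character detects a split run and each boundary checks non-increasing total frequency.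
import Mathlib
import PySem

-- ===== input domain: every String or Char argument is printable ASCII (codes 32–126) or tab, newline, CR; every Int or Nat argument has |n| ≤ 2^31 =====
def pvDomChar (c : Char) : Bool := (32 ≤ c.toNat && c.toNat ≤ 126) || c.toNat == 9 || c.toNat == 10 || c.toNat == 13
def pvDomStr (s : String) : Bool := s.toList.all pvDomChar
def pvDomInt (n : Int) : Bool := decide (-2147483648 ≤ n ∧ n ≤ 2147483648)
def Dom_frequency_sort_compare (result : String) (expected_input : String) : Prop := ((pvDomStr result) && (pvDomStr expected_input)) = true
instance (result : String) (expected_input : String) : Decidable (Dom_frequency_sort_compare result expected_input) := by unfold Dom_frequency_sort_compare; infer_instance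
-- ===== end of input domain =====

-- B replaces A's run-measuring while loop by a Counter-equality permutation test plus one
-- zip pass over adjacent pairs with a set of closed characters; alternative decomposition.

-- ===== PORT A =====
-- A's outer while loop over index i with the inner run-counting while loop; the run starting
-- at i is the takeWhile prefix, and i jumps to the dropWhile suffix. prev_freq = float("inf")
-- is modelled as Option Int none (freq > inf is always false, exactly as in Python).
def pyALoop (cnt : PySem.Dict Char Int) (prev : Option Int) (l : List Char) : Bool :=
  match l with
  | [] => true
  | c :: rest =>
    let freq := cnt.getD c 0
    let count : Int := ((c :: rest).takeWhile (fun x => x == c)).length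
    if count ≠ freq then false
    else if (match prev with | none => false | some p => freq > p) then false
    else pyALoop cnt (some freq) ((c :: rest).dropWhile (fun x => x == c))
termination_by l.length
decreasing_by
  simp only [List.dropWhile, beq_self_eq_true, List.length_cons]
  exact Nat.lt_succ_of_le (List.length_dropWhile_le _ _)

-- isinstance(result, str) is always true under the type convention (result : String).
def frequency_sort_compare (result : String) (expected_input : String) : Bool :=
  let rl := result.toList
  let el := expected_input.toList
  if rl.length ≠ el.length then false
  else if PySem.List.sorted rl (fun x => x) false ≠ PySem.List.sorted el (fun x => x) false then false
  else pyALoop (PySem.Dict.counter el) none rl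

-- ===== PORT B =====
-- the 'for a, b in zip(result, result[1:])' loop with early return and the mutating set
-- 'closed', as a structural recursion over the zipped pair list carrying the set.
def okB (cnt : PySem.Dict Char Int) (closed : PySem.Set Char) : List (Char × Char) → Bool
  | [] => true
  | (a, b) :: rest =>
    if a ≠ b then
      if b ∈ closed ∨ cnt.getD a 0 < cnt.getD b 0 then false
      else okB cnt (PySem.Set.add closed a) rest
    else okB cnt closed rest

-- Python's dict != compares the two dicts as unordered mappings; a Counter stores no zero
-- counts, so agreement of getD-with-default-0 on both key sets is exact here.
def frequency_sort_compare_alt (result : String) (expected_input : String) : Bool :=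
  let rl := result.toList
  let cnt := PySem.Dict.counter rl
  let exp := PySem.Dict.counter expected_input.toList
  if !(cnt.keys.all (fun k => cnt.getD k 0 == exp.getD k 0) &&
       exp.keys.all (fun k => cnt.getD k 0 == exp.getD k 0)) then false
  else okB cnt PySem.Set.empty (rl.zip rl.tail)

-- ===== PRECONDITION & SPEC =====
def Spec_frequency_sort_compare (result : String) (expected_input : String) (out : Bool) : Prop := out = frequency_sort_compare_alt result expected_input
instance (result : String) (expected_input : String) (out : Bool) : Decidable (Spec_frequency_sort_compare result expected_input out) := by unfold Spec_frequency_sort_compare; infer_instance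

-- ===== CLAIM (what is proved, stated in full; the proofs are below) =====
def Claim_equal_frequency_sort_compare : Prop := ∀ (result : String) (expected_input : String), Dom_frequency_sort_compare result expected_input → Spec_frequency_sort_compare result expected_input (frequency_sort_compare result expected_input)

-- ===== LEMMAS AND PROOFS =====

-- The run decomposition of a list (proof-side characterisation, used for both ports).
def runsOf (l : List Char) : List (Char × Int) :=
  match l with
  | [] => []
  | c :: rest =>
    (c, ((c :: rest).takeWhile (fun x => x == c)).length) ::
      runsOf ((c :: rest).dropWhile (fun x => x == c))
termination_by l.length
decreasing_by
  simp only [List.dropWhile, beq_self_eq_true, List.length_cons]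
  exact Nat.lt_succ_of_le (List.length_dropWhile_le _ _)

-- "prev_freq not yet exceeded" as a recursion over the list of frequencies.
def nonIncFrom (prev : Option Int) (fs : List Int) : Bool :=
  match fs with
  | [] => true
  | f :: fs' =>
    (match prev with | none => true | some p => !(f > p : Bool)) && nonIncFrom (some f) fs'

lemma pyALoop_eq_runs (cnt : PySem.Dict Char Int) :
    ∀ (prev : Option Int) (l : List Char),
      pyALoop cnt prev l =
        ((runsOf l).all (fun r => r.2 == cnt.getD r.1 0)
          && nonIncFrom prev ((runsOf l).map (fun r => cnt.getD r.1 0))) := by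
  intro prev l
  induction prev, l using pyALoop.induct cnt with
  | case1 => simp [pyALoop, runsOf, nonIncFrom]
  | case2 prev c rest freq count hne =>
    rw [pyALoop.eq_def, runsOf.eq_def]
    simp only [List.all_cons, List.map_cons]
    rw [if_pos hne]
    have hbeq : ((((c :: rest).takeWhile (fun x => x == c)).length : Int) == cnt.getD c 0) = false :=
      beq_eq_false_iff_ne.mpr hne
    rw [hbeq]
    simp only [Bool.false_and]
  | case3 prev c rest freq count heq hgt =>
    rw [pyALoop.eq_def, runsOf.eq_def]
    simp only [List.all_cons, List.map_cons]
    rw [if_neg heq, if_pos hgt]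
    obtain ⟨p, rfl⟩ : ∃ p, prev = some p := by
      cases prev with
      | none => exact absurd hgt (by simp)
      | some p => exact ⟨p, rfl⟩
    have hgt' : decide (p < cnt.getD c 0) = true := decide_eq_true (by simpa using hgt)
    simp only [nonIncFrom, hgt', Bool.not_true, Bool.false_and, Bool.and_false]
  | case4 prev c rest freq count heq hgt ih =>
    rw [pyALoop.eq_def, runsOf.eq_def]
    simp only [List.all_cons, List.map_cons]
    rw [if_neg heq, if_neg hgt]
    have hbeq : ((((c :: rest).takeWhile (fun x => x == c)).length : Int) == cnt.getD c 0) = true :=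
      beq_iff_eq.mpr (not_not.mp heq)
    rw [hbeq, ih]
    simp only [Bool.true_and]
    cases prev with
    | none => simp only [nonIncFrom, Bool.true_and]; rfl
    | some p =>
      have hle : decide (p < cnt.getD c 0) = false := decide_eq_false (by simpa using hgt)
      simp only [nonIncFrom, hle, Bool.not_false, Bool.true_and]; rfl


-- head of dropWhile (· == c) never equals c
lemma dropWhile_head_ne (c : Char) :
    ∀ (l : List Char) (b : Char) (t : List Char),
      l.dropWhile (fun x => x == c) = b :: t → b ≠ c := by
  intro l
  induction l with
  | nil => intro b t h; simp [List.dropWhile] at h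
  | cons x xs ih =>
    intro b t h
    by_cases hx : x = c
    · subst hx
      rw [List.dropWhile_cons, if_pos (by simp)] at h
      exact ih b t h
    · rw [List.dropWhile_cons, if_neg (by simpa using hx)] at h
      injection h with h1 _
      subst h1; exact hx

lemma count_takeWhile_self (c : Char) (l : List Char) :
    (l.takeWhile (fun x => x == c)).count c = (l.takeWhile (fun x => x == c)).length :=
  List.count_eq_length.mpr (fun b hb => ((by simpa using List.mem_takeWhile_imp hb) : b = c).symm)

lemma count_takeWhile_ne (c d : Char) (hdc : d ≠ c) (l : List Char) :
    (l.takeWhile (fun x => x == c)).count d = 0 :=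
  List.count_eq_zero.mpr (fun hd => hdc (by simpa using List.mem_takeWhile_imp hd))

lemma count_split_run (c d : Char) (l : List Char) :
    l.count d = (l.takeWhile (fun x => x == c)).count d + (l.dropWhile (fun x => x == c)).count d := by
  conv_lhs => rw [← List.takeWhile_append_dropWhile (p := fun x => x == c) (l := l)]
  rw [List.count_append]

-- one run-step of the zip pass
lemma okB_cons_run (cnt : PySem.Dict Char Int) (c : Char) :
    ∀ (rest : List Char) (closed : PySem.Set Char),
      okB cnt closed ((c :: rest).zip rest) =
        (match (c :: rest).dropWhile (fun x => x == c) with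
         | [] => true
         | b :: t' =>
           if b ∈ closed ∨ cnt.getD c 0 < cnt.getD b 0 then false
           else okB cnt (PySem.Set.add closed c) ((b :: t').zip t')) := by
  intro rest
  induction rest with
  | nil => intro closed; simp [okB, List.dropWhile]
  | cons r rest' ih =>
    intro closed
    by_cases hr : r = c
    · subst hr
      have h2 : (r :: r :: rest').dropWhile (fun x => x == r) = (r :: rest').dropWhile (fun x => x == r) := by
        rw [List.dropWhile_cons, if_pos (by simp)]
      rw [List.zip_cons_cons]
      have h1 : okB cnt closed ((r, r) :: (r :: rest').zip rest') = okB cnt closed ((r :: rest').zip rest') := by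
        simp [okB]
      rw [h2, h1, ih closed]
    · have h2 : (c :: r :: rest').dropWhile (fun x => x == c) = r :: rest' := by
        rw [List.dropWhile_cons, if_pos (by simp), List.dropWhile_cons, if_neg (by simpa using hr)]
      rw [List.zip_cons_cons, h2]
      simp only [okB]
      rw [if_pos (Ne.symm hr)]

lemma okB_run_nil (cnt : PySem.Dict Char Int) (c : Char) (rest : List Char) (closed : PySem.Set Char)
    (h : (c :: rest).dropWhile (fun x => x == c) = []) :
    okB cnt closed ((c :: rest).zip rest) = true := by
  rw [okB_cons_run, h]

lemma okB_run_cons (cnt : PySem.Dict Char Int) (c : Char) (rest : List Char) (closed : PySem.Set Char)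
    (b : Char) (t' : List Char)
    (h : (c :: rest).dropWhile (fun x => x == c) = b :: t') :
    okB cnt closed ((c :: rest).zip rest) =
      (if b ∈ closed ∨ cnt.getD c 0 < cnt.getD b 0 then false
       else okB cnt (PySem.Set.add closed c) ((b :: t').zip t')) := by
  rw [okB_cons_run, h]

-- a closed character that reappears (not at the head) forces the pass to fail
lemma okB_false_of_closed (cnt : PySem.Dict Char Int) (x : Char) :
    ∀ (v : List Char) (y : Char) (closed : PySem.Set Char),
      x ∈ closed → x ≠ y → x ∈ v → okB cnt closed ((y :: v).zip v) = false := by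
  intro v
  induction v with
  | nil => intro y closed _ _ hx; simp at hx
  | cons z w ih =>
    intro y closed hxc hxy hxv
    rw [List.zip_cons_cons]
    by_cases hyz : y = z
    · subst hyz
      have h1 : okB cnt closed ((y, y) :: (y :: w).zip w) = okB cnt closed ((y :: w).zip w) := by
        simp [okB]
      rw [h1]
      have hxw : x ∈ w := by
        cases hxv with
        | head => exact absurd rfl hxy
        | tail _ h => exact h
      exact ih y closed hxc hxy hxw
    · by_cases hxz : x = z
      · subst hxz
        simp [okB, hyz, hxc]
      · have hxw : x ∈ w := by
          cases hxv with
          | head => exact absurd rfl hxz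
          | tail _ h => exact h
        simp only [okB]
        rw [if_pos (hyz : y ≠ z)]
        split
        · rfl
        · exact ih z (PySem.Set.add closed y) ((PySem.Set.mem_add closed y x).mpr (Or.inl hxc)) hxz hxw

lemma okB_eq_runs (cnt : PySem.Dict Char Int) :
    ∀ (s : List Char), (∀ c ∈ s, cnt.getD c 0 = (s.count c : Int)) →
      ∀ (closed : PySem.Set Char), (∀ x ∈ closed, x ∉ s) →
      okB cnt closed (s.zip s.tail) =
        ((runsOf s).all (fun r => r.2 == cnt.getD r.1 0)
          && nonIncFrom none ((runsOf s).map (fun r => cnt.getD r.1 0))) := by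
  intro s
  induction s using runsOf.induct with
  | case1 => intro _ closed _; simp [okB, runsOf, nonIncFrom]
  | case2 c rest ih =>
    intro hs closed hclosed
    have hnc : cnt.getD c 0 = ((c :: rest).count c : Int) := hs c List.mem_cons_self
    rw [List.tail_cons, runsOf.eq_def]
    simp only [List.all_cons, List.map_cons]
    cases ht : (c :: rest).dropWhile (fun x => x == c) with
    | nil =>
      have hcount2 : (c :: rest).count c = ((c :: rest).takeWhile (fun x => x == c)).length := by
        rw [count_split_run c c (c :: rest), count_takeWhile_self, ht]; simp
      have hk : ((((c :: rest).takeWhile (fun x => x == c)).length : Int) == cnt.getD c 0) = true := by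
        rw [beq_iff_eq, hnc, hcount2]
      rw [okB_run_nil cnt c rest closed ht, hk]
      simp [runsOf, nonIncFrom]
    | cons b t' =>
      rw [ht] at ih
      simp only [List.tail_cons] at ih
      have hbc : b ≠ c := dropWhile_head_ne c (c :: rest) b t' ht
      have hmem_t_s : ∀ d, d ∈ b :: t' → d ∈ c :: rest := by
        intro d hd
        rw [← ht] at hd
        exact (List.dropWhile_sublist (p := fun x => x == c)).mem hd
      have hcount2 : (c :: rest).count c
          = ((c :: rest).takeWhile (fun x => x == c)).length + (b :: t').count c := by
        rw [count_split_run c c (c :: rest), count_takeWhile_self, ht]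
      rw [okB_run_cons cnt c rest closed b t' ht]
      by_cases hct : c ∈ b :: t'
      · -- a split run: both sides are false
        have hLHS : (if b ∈ closed ∨ cnt.getD c 0 < cnt.getD b 0 then false
            else okB cnt (PySem.Set.add closed c) ((b :: t').zip t')) = false := by
          split
          · rfl
          · have hct' : c ∈ t' := by
              cases hct with
              | head => exact absurd rfl (Ne.symm hbc)
              | tail _ h => exact h
            exact okB_false_of_closed cnt c t' b (PySem.Set.add closed c)
              ((PySem.Set.mem_add closed c c).mpr (Or.inr rfl)) (Ne.symm hbc) hct'
        have hkne : ((((c :: rest).takeWhile (fun x => x == c)).length : Int) == cnt.getD c 0) = false := by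
          rw [beq_eq_false_iff_ne]
          intro h
          have hpos : 0 < (b :: t').count c := List.count_pos_iff.mpr hct
          rw [hnc, hcount2] at h
          omega
        rw [hLHS, hkne]
        simp
      · -- contiguous run: recurse
        have h0 : (b :: t').count c = 0 := List.count_eq_zero.mpr hct
        have hk : ((((c :: rest).takeWhile (fun x => x == c)).length : Int) == cnt.getD c 0) = true := by
          rw [beq_iff_eq, hnc, hcount2]
          omega
        have hbnc : b ∉ closed := fun h => hclosed b h (hmem_t_s b List.mem_cons_self)
        have hs' : ∀ d ∈ (b :: t'), cnt.getD d 0 = (((b :: t')).count d : Int) := by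
          intro d hd
          have hdc : d ≠ c := fun h => hct (h ▸ hd)
          have hsplit := count_split_run c d (c :: rest)
          rw [count_takeWhile_ne c d hdc, ht] at hsplit
          rw [hs d (hmem_t_s d hd)]
          omega
        have hclosed' : ∀ x ∈ PySem.Set.add closed c, x ∉ (b :: t') := by
          intro x hx
          rcases (PySem.Set.mem_add closed c x).mp hx with h | h
          · exact fun hmem => hclosed x h (hmem_t_s x hmem)
          · subst h; exact hct
        have ihres := ih hs' (PySem.Set.add closed c) hclosed'
        by_cases hlt : cnt.getD c 0 < cnt.getD b 0
        · rw [if_pos (Or.inr hlt), runsOf.eq_def]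
          simp [nonIncFrom, hlt]
        · have hcond : ¬ (b ∈ closed ∨ cnt.getD c 0 < cnt.getD b 0) := by
            intro h
            rcases h with h | h
            · exact hbnc h
            · exact hlt h
          have hngt : (decide (cnt.getD b 0 > cnt.getD c 0)) = false := by
            simp only [gt_iff_lt, decide_eq_false_iff_not]
            omega
          rw [if_neg hcond, ihres, hk, runsOf.eq_def]
          simp only [List.all_cons, List.map_cons, nonIncFrom, hngt, Bool.not_false,
            Bool.true_and, Bool.and_assoc]

-- B's Counter-equality guard holds exactly on permutations
lemma counterEq_iff (rl el : List Char) :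
    ((PySem.Dict.counter rl).keys.all
        (fun k => (PySem.Dict.counter rl).getD k 0 == (PySem.Dict.counter el).getD k 0) &&
     (PySem.Dict.counter el).keys.all
        (fun k => (PySem.Dict.counter rl).getD k 0 == (PySem.Dict.counter el).getD k 0)) = true
    ↔ rl.Perm el := by
  rw [List.perm_iff_count]
  simp only [Bool.and_eq_true, List.all_eq_true, PySem.Dict.getD_counter,
    PySem.Dict.keys_counter, PySem.Set.mem_ofList, beq_iff_eq]
  constructor
  · rintro ⟨h1, h2⟩ a
    by_cases ha : a ∈ rl
    · exact_mod_cast h1 a ha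
    · by_cases hb : a ∈ el
      · exact_mod_cast h2 a hb
      · rw [List.count_eq_zero_of_not_mem ha, List.count_eq_zero_of_not_mem hb]
  · intro h
    exact ⟨fun a _ => by exact_mod_cast h a, fun a _ => by exact_mod_cast h a⟩

-- ===== VERDICT (by name: the statement is the Claim_ definition above) =====
theorem frequency_sort_compare_spec : Claim_equal_frequency_sort_compare := by
  intro result expected_input _
  unfold Spec_frequency_sort_compare frequency_sort_compare frequency_sort_compare_alt
  simp only []
  by_cases hperm : result.toList.Perm expected_input.toList
  · have hlen : result.toList.length = expected_input.toList.length := hperm.length_eq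
    have hsort : PySem.List.sorted result.toList (fun x => x) false
        = PySem.List.sorted expected_input.toList (fun x => x) false :=
      (PySem.List.sorted_id_eq_sorted_id_iff_perm _ _).mpr hperm
    have hcnt := (counterEq_iff result.toList expected_input.toList).mpr hperm
    rw [if_neg (by simp [hlen]), if_neg (by simp [hsort]), hcnt]
    simp only [Bool.not_true, Bool.false_eq_true, if_false]
    rw [pyALoop_eq_runs,
      okB_eq_runs (PySem.Dict.counter result.toList) result.toList
        (fun c _ => PySem.Dict.getD_counter result.toList c)
        PySem.Set.empty (by intro x hx; simp [PySem.Set.empty] at hx)]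
    simp only [PySem.Dict.getD_counter]
    have hc : ∀ a : Char, result.toList.count a = expected_input.toList.count a :=
      fun a => hperm.count_eq a
    simp only [hc]
  · have hcnt : ((PySem.Dict.counter result.toList).keys.all
        (fun k => (PySem.Dict.counter result.toList).getD k 0
          == (PySem.Dict.counter expected_input.toList).getD k 0) &&
      (PySem.Dict.counter expected_input.toList).keys.all
        (fun k => (PySem.Dict.counter result.toList).getD k 0
          == (PySem.Dict.counter expected_input.toList).getD k 0)) = false := by
      rw [← Bool.not_eq_true]
      exact fun h => hperm ((counterEq_iff _ _).mp h)
    rw [hcnt]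
    simp only [Bool.not_false, if_true]
    by_cases hlen : result.toList.length = expected_input.toList.length
    · have hsne : PySem.List.sorted result.toList (fun x => x) false
          ≠ PySem.List.sorted expected_input.toList (fun x => x) false :=
        fun h => hperm ((PySem.List.sorted_id_eq_sorted_id_iff_perm _ _).mp h)
      rw [if_neg (by simpa using hlen), if_pos hsne]
    · rw [if_pos hlen]
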